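-- pv_equiv track=rewrite | github.com/stoicio/AoC | solutions/hex_grid.py | solve
-- ===== SOURCE A (Python) =====
-- movement_to_postion = {
--     'n': (-1, 0, 1),
--     's': (1, 0, -1),
--     'ne': (-1, 1, 0),
--     'se': (0, 1, -1),
--     'nw': (0, -1, 1),
--     'sw': (1, -1, 0)
-- }
--
-- def solve(input_movements):
--
--     def get_distance(current_pos):
--         return max(abs(i) for i in current_pos)
--
--     movements = input_movements.strip().split(',')
--     current = [0, 0, 0]
--     max_dist, current_dist = 0, 0
--     for move in movements:
--         current[0] += movement_to_postion[move][0]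
--         current[1] += movement_to_postion[move][1]
--         current[2] += movement_to_postion[move][2]
--         current_dist = get_distance(current)
--         if max_dist < current_dist:
--             max_dist = current_dist
--     return current_dist, max_dist
-- ===== SOURCE B (Python) =====
-- movement_to_postion = {
--     'n': (-1, 0, 1),
--     's': (1, 0, -1),
--     'ne': (-1, 1, 0),
--     'se': (0, 1, -1),
--     'nw': (0, -1, 1),
--     'sw': (1, -1, 0)
-- }
--
-- def solve(input_movements):
--     # Pass 1: build the full trajectory of cumulative cube-coordinate positions.
--     positions = []
--     pos = (0, 0, 0)
--     for m in input_movements.strip().split(','):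
--         d = movement_to_postion[m]
--         pos = (pos[0] + d[0], pos[1] + d[1], pos[2] + d[2])
--         positions.append(pos)
--     # Pass 2: map each position to its hex distance, then reduce.
--     dists = [max(abs(x), abs(y), abs(z)) for x, y, z in positions]
--     return dists[-1], max(dists)
-- ===== Notes on version B (the rewrite author's own statement) =====
-- stated objective: alternative
-- what changed: B builds the full trajectory of cumulative positions first, then maps it to a distances list and returns (last distance, max of the list), replacing A's interleaved in-place mutation with running current/max distances; agreement uses that distances are nonnegative so max over the list equals A's 0-initialised running max.
import Mathlib
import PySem

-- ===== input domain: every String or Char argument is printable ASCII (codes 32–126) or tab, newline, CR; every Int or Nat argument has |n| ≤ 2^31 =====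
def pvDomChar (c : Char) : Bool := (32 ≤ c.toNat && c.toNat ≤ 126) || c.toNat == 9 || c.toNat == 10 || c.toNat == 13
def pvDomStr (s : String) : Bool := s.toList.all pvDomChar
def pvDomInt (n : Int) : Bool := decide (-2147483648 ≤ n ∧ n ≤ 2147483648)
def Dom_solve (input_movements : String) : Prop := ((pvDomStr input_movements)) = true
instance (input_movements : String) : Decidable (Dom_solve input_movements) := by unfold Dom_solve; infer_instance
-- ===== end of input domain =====

-- B builds the trajectory of cumulative positions first, then maps it to distances and
-- takes last/max in separate passes, instead of A's interleaved running-max loop (objective: alternative).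

-- the module-level dict movement_to_postion, as a lookup (none = KeyError, excluded by Pre_)
def moveTbl (m : String) : Option (Int × Int × Int) :=
  if m = "n" then some (-1, 0, 1)
  else if m = "s" then some (1, 0, -1)
  else if m = "ne" then some (-1, 1, 0)
  else if m = "se" then some (0, 1, -1)
  else if m = "nw" then some (0, -1, 1)
  else if m = "sw" then some (1, -1, 0)
  else none

-- tokens of input.strip().split(',')  (split? is some for the non-empty separator ",")
def pvToks (s : String) : List String :=
  (PySem.Str.split? (PySem.Str.strip s) ",").getD []

-- ===== PORT A =====
def solve (input_movements : String) : Int × Int :=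
  let movements := pvToks input_movements
  let st := movements.foldl
    (fun (acc : (Int × Int × Int) × Int × Int) move =>
      let d := (moveTbl move).getD (0, 0, 0)   -- lookup; KeyError (= none) excluded by Pre_
      let c := (acc.1.1 + d.1, acc.1.2.1 + d.2.1, acc.1.2.2 + d.2.2)
      let current_dist := max (max |c.1| |c.2.1|) |c.2.2|
      let max_dist := if acc.2.1 < current_dist then current_dist else acc.2.1
      (c, max_dist, current_dist))
    ((0, 0, 0), 0, 0)
  (st.2.2, st.2.1)

-- ===== PORT B =====
def solve_alt (input_movements : String) : Int × Int :=
  let moves := (pvToks input_movements).map (fun m => (moveTbl m).getD (0, 0, 0))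
  let positions := (moves.foldl
    (fun (acc : (Int × Int × Int) × List (Int × Int × Int)) d =>
      let p := (acc.1.1 + d.1, acc.1.2.1 + d.2.1, acc.1.2.2 + d.2.2)
      (p, acc.2 ++ [p])) ((0, 0, 0), [])).2
  let dists := positions.map (fun p => max (max |p.1| |p.2.1|) |p.2.2|)
  ((PySem.List.pyGet? dists (-1)).getD 0,       -- dists[-1]; IndexError (= none) unreachable under Pre_
   (PySem.List.max? dists (fun x => x)).getD 0) -- max(dists); empty case unreachable under Pre_

-- ===== PRECONDITION & SPEC =====
-- Pre_ excludes exactly the inputs where some comma-separated token of the stripped string is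
-- not a key of the movement dict (including the empty input, whose split is ['']): there A raises KeyError.
def Pre_solve (input_movements : String) : Prop :=
  (pvToks input_movements).all (fun m => (moveTbl m).isSome) = true
instance (input_movements : String) : Decidable (Pre_solve input_movements) := by
  unfold Pre_solve; infer_instance

def pvWitness_solve : String := "ne,ne,s,s"

def Spec_solve (input_movements : String) (out : Int × Int) : Prop := out = solve_alt input_movements
instance (input_movements : String) (out : Int × Int) : Decidable (Spec_solve input_movements out) := by unfold Spec_solve; infer_instance

-- ===== CLAIM (what is proved, stated in full; the proofs are below) =====
def Claim_equal_solve : Prop := ∀ (input_movements : String), Dom_solve input_movements → Pre_solve input_movements → Spec_solve input_movements (solve input_movements)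

-- ===== LEMMAS AND PROOFS =====

-- abbreviations for the proof (not used by the ports)
def pvAdd (c d : Int × Int × Int) : Int × Int × Int := (c.1 + d.1, c.2.1 + d.2.1, c.2.2 + d.2.2)
def pvDist (p : Int × Int × Int) : Int := max (max |p.1| |p.2.1|) |p.2.2|
def pvLook (m : String) : Int × Int × Int := (moveTbl m).getD (0, 0, 0)

def pvTraj (c : Int × Int × Int) : List (Int × Int × Int) → List (Int × Int × Int)
  | [] => []
  | d :: ds => pvAdd c d :: pvTraj (pvAdd c d) ds

lemma pvDist_nonneg (p : Int × Int × Int) : 0 ≤ pvDist p :=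
  le_max_of_le_right (abs_nonneg _)

lemma fold_g_eq (ds : List (Int × Int × Int)) : ∀ (c : Int × Int × Int) (acc : List (Int × Int × Int)),
    ds.foldl (fun (acc : (Int × Int × Int) × List (Int × Int × Int)) d =>
      let p := (acc.1.1 + d.1, acc.1.2.1 + d.2.1, acc.1.2.2 + d.2.2)
      (p, acc.2 ++ [p])) (c, acc)
    = (ds.foldl pvAdd c, acc ++ pvTraj c ds) := by
  induction ds with
  | nil => intro c acc; simp [pvTraj]
  | cons d ds ih =>
    intro c acc
    simp only [List.foldl_cons, pvTraj, ih, pvAdd, List.append_assoc, List.singleton_append]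

lemma getLast?_getD_cons (x : Int) (l : List Int) (cd : Int) :
    ((x :: l).getLast?).getD cd = (l.getLast?).getD x := by
  cases hl : l.getLast? with
  | none =>
    rw [List.getLast?_eq_none_iff] at hl; subst hl; simp
  | some a =>
    have hne : l ≠ [] := by
      intro h; subst h; simp at hl
    rcases List.exists_cons_of_ne_nil hne with ⟨y, t, rfl⟩
    rw [List.getLast?_cons_cons, hl]; simp

lemma fold_A_eq (toks : List String) : ∀ (c : Int × Int × Int) (md cd : Int),
    toks.foldl (fun (acc : (Int × Int × Int) × Int × Int) move =>
      let d := pvLook move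
      let p := (acc.1.1 + d.1, acc.1.2.1 + d.2.1, acc.1.2.2 + d.2.2)
      let cur := max (max |p.1| |p.2.1|) |p.2.2|
      (p, (if acc.2.1 < cur then cur else acc.2.1), cur)) (c, md, cd)
    = (List.foldl pvAdd c (toks.map pvLook),
       ((pvTraj c (toks.map pvLook)).map pvDist).foldl (fun m x => if m < x then x else m) md,
       (((pvTraj c (toks.map pvLook)).map pvDist).getLast?).getD cd) := by
  induction toks with
  | nil => intro c md cd; simp [pvTraj]
  | cons t toks ih =>
    intro c md cd
    simp only [List.foldl_cons, List.map_cons, pvTraj, ih, pvAdd, pvDist]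
    refine congrArg _ (congrArg _ ?_)
    exact (getLast?_getD_cons _ _ _).symm

lemma foldl_if_eq_max (l : List Int) : ∀ m : Int,
    l.foldl (fun m x => if m < x then x else m) m = l.foldl max m := by
  induction l with
  | nil => intro m; rfl
  | cons x l ih =>
    intro m
    simp only [List.foldl_cons, ih]
    congr 1
    rcases lt_or_ge m x with h | h
    · simp [h, max_eq_right h.le]
    · simp [not_lt.mpr h, max_eq_left h]

lemma pvMain (toks : List String) :
    (((toks.foldl (fun (acc : (Int × Int × Int) × Int × Int) move =>
        let d := pvLook move
        let p := (acc.1.1 + d.1, acc.1.2.1 + d.2.1, acc.1.2.2 + d.2.2)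
        let cur := max (max |p.1| |p.2.1|) |p.2.2|
        (p, (if acc.2.1 < cur then cur else acc.2.1), cur)) ((0, 0, 0), 0, 0))).2.2,
     ((toks.foldl (fun (acc : (Int × Int × Int) × Int × Int) move =>
        let d := pvLook move
        let p := (acc.1.1 + d.1, acc.1.2.1 + d.2.1, acc.1.2.2 + d.2.2)
        let cur := max (max |p.1| |p.2.1|) |p.2.2|
        (p, (if acc.2.1 < cur then cur else acc.2.1), cur)) ((0, 0, 0), 0, 0))).2.1)
    = ((PySem.List.pyGet? ((((toks.map pvLook).foldl
          (fun (acc : (Int × Int × Int) × List (Int × Int × Int)) d =>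
            let p := (acc.1.1 + d.1, acc.1.2.1 + d.2.1, acc.1.2.2 + d.2.2)
            (p, acc.2 ++ [p])) ((0, 0, 0), [])).2).map pvDist) (-1)).getD 0,
       (PySem.List.max? ((((toks.map pvLook).foldl
          (fun (acc : (Int × Int × Int) × List (Int × Int × Int)) d =>
            let p := (acc.1.1 + d.1, acc.1.2.1 + d.2.1, acc.1.2.2 + d.2.2)
            (p, acc.2 ++ [p])) ((0, 0, 0), [])).2).map pvDist) (fun x => x)).getD 0) := by
  rw [fold_A_eq toks (0, 0, 0) 0 0, fold_g_eq (toks.map pvLook) (0, 0, 0) []]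
  simp only [List.nil_append]
  rw [PySem.List.pyGet?_neg_one]
  cases hT : pvTraj (0, 0, 0) (toks.map pvLook) with
  | nil => simp [PySem.List.max?]
  | cons p ps =>
    simp only [List.map_cons]
    rw [PySem.List.max?_id_cons]
    simp only [Option.getD_some, List.foldl_cons, foldl_if_eq_max]
    have h0 : (if (0 : Int) < pvDist p then pvDist p else 0) = pvDist p := by
      have := pvDist_nonneg p
      rcases lt_or_eq_of_le this with h | h
      · simp [h]
      · simp [← h]
    rw [h0]

-- ===== VERDICT (by name: the statement is the Claim_ definition above) =====
set_option maxHeartbeats 2000000 in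
theorem solve_spec : Claim_equal_solve := by
  intro s _ _
  show solve s = solve_alt s
  exact pvMain (pvToks s)
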